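-- pv_equiv track=rewrite | github.com/katarzynaadamczyk/AoC | 2015/Day_19/task.py | change_duplicates
-- ===== SOURCE A (Python) =====
-- def change_duplicates(molecule: list[str]) -> tuple[int, list[str]]:
--     duplicates_dict = {('Ca', 'Ca'): 'Ca', ('Ti', 'Ti'): 'Ti', ("Si", "Th"): "Ca", ("Th", "Ca"): "Th"}
--     changes = 0
--     changes_made = True
--     while changes_made:
--         i = 0
--         while i < len(molecule):
--             changes_made = False
--             for tuple_, item in duplicates_dict.items():
--                 tuple_len = len(tuple_)
--                 tuple_list = list(tuple_)
--                 if molecule[i:i+tuple_len] == tuple_list: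
--                     molecule = molecule[:i] + [item] + molecule[i+tuple_len:]
--                     changes_made = True
--                     changes += 1
--                     break
--             if not changes_made:
--                 i += 1
--     return changes, molecule
-- ===== SOURCE B (Python) =====
-- def change_duplicates(molecule: list[str]) -> tuple[int, list[str]]:
--     rules = {('Ca', 'Ca'): 'Ca', ('Ti', 'Ti'): 'Ti', ("Si", "Th"): "Ca", ("Th", "Ca"): "Th"}
--     out = []
--     for tok in molecule:
--         if out:
--             r = rules.get((out[-1], tok))
--             if r is not None:
--                 out[-1] = r
--                 continue
--         out.append(tok)
--     return len(molecule) - len(out), out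
-- ===== Notes on version B (the rewrite author's own statement) =====
-- stated objective: faster
-- what changed: Replaces the restart-the-scan while/while/for with repeated list slicing-and-copying by one left-to-right pass that merges each incoming token with the last output token, recovering the change count as the length difference.
-- outside the precondition, e.g. on change_duplicates([]): A does not finish within the time limit, B returns (0, [])
import Mathlib
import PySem

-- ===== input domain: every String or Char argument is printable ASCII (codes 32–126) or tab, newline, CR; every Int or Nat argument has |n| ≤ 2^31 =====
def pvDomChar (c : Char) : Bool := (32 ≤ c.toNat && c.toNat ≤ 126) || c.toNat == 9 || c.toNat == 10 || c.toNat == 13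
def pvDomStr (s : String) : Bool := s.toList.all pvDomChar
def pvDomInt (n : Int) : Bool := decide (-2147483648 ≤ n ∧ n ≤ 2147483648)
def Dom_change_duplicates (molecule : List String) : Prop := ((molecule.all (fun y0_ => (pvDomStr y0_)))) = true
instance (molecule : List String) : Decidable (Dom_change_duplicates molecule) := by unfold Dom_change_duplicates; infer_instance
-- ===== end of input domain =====

-- B replaces A's restart-scanning nested loops (with list slicing on every rewrite) by a single
-- left-to-right pass merging each token with the last output token; count = length difference.

-- ===== PORT A =====
-- duplicates_dict, in insertion order
def pvDupDict : List ((String × String) × String) :=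
  [(("Ca", "Ca"), "Ca"), (("Ti", "Ti"), "Ti"), (("Si", "Th"), "Ca"), (("Th", "Ca"), "Th")]

-- the 'for tuple_, item in duplicates_dict.items(): … break' loop: first rule whose 2-slice matches
def pvTryRules (molecule : List String) (i : Int) : Option ((String × String) × String) :=
  pvDupDict.find? (fun r => PySem.List.slice molecule (some i) (some (i + 2)) == [r.1.1, r.1.2])

-- inner 'while i < len(molecule)' over state (molecule, i, changes, changes_made);
-- fuel only makes the recursion total (2*len(molecule)+1 always suffices, as the proofs below show)
def pvInner : Nat → List String → Int → Int → Bool → List String × Int × Bool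
  | 0, m, _, c, cm => (m, c, cm)
  | f + 1, m, i, c, cm =>
    if i < (m.length : Int) then
      match pvTryRules m i with
      | some r =>
        pvInner f (PySem.List.slice m none (some i) ++ [r.2] ++ PySem.List.slice m (some (i + 2)) none)
          i (c + 1) true
      | none => pvInner f m (i + 1) c false
    else (m, c, cm)

-- outer 'while changes_made'; fuel guard only (it exits after the first pass on non-empty input)
def pvOuter : Nat → List String → Int → Bool → Int × List String
  | 0, m, c, _ => (c, m)
  | f + 1, m, c, cm =>
    if cm then
      let r := pvInner (2 * m.length + 1) m 0 c cm
      pvOuter f r.1 r.2.1 r.2.2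
    else (c, m)

def change_duplicates (molecule : List String) : Int × List String :=
  pvOuter (molecule.length + 2) molecule 0 true

-- ===== PORT B =====
def pvRules : List ((String × String) × String) :=
  [(("Ca", "Ca"), "Ca"), (("Ti", "Ti"), "Ti"), (("Si", "Th"), "Ca"), (("Th", "Ca"), "Th")]

-- rules.get((a, b))
def pvRuleGet (a b : String) : Option String :=
  (pvRules.find? (fun r => r.1 == (a, b))).map (·.2)

-- one loop body: merge tok into out[-1] if a rule applies, else append
def pvBStep (out : List String) (tok : String) : List String :=
  match out.getLast? with
  | none => out ++ [tok]
  | some last =>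
    match pvRuleGet last tok with
    | some r => out.dropLast ++ [r]
    | none => out ++ [tok]

def change_duplicates_alt (molecule : List String) : Int × List String :=
  let out := molecule.foldl pvBStep []
  ((molecule.length : Int) - (out.length : Int), out)

-- ===== PRECONDITION & SPEC =====
-- Pre_ excludes only the empty list, on which A's outer 'while changes_made' never terminates (changes_made stays True).
def Pre_change_duplicates (molecule : List String) : Prop := molecule ≠ []
instance (molecule : List String) : Decidable (Pre_change_duplicates molecule) := by
  unfold Pre_change_duplicates; infer_instance

def pvWitness_change_duplicates : List String := ["Si", "Th", "Ca"]

def Spec_change_duplicates (molecule : List String) (out : Int × List String) : Prop :=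
  out = change_duplicates_alt molecule
instance (molecule : List String) (out : Int × List String) : Decidable (Spec_change_duplicates molecule out) := by
  unfold Spec_change_duplicates; infer_instance

-- ===== CLAIM (what is proved, stated in full; the proofs are below) =====
def Claim_equal_change_duplicates : Prop :=
  ∀ (molecule : List String), Dom_change_duplicates molecule → Pre_change_duplicates molecule →
    Spec_change_duplicates molecule (change_duplicates molecule)

-- ===== LEMMAS AND PROOFS =====

-- the result of the common forward-only merge process, starting with current token `cur`
def pvProc : String → List String → List String
  | cur, [] => [cur]
  | cur, t :: rest =>
    match pvRuleGet cur t with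
    | some r => pvProc r rest
    | none => cur :: pvProc t rest

-- B's fold over a non-empty accumulator is pvProc on the last element
lemma pvFold_eq : ∀ (rest : List String) (s : List String) (cur : String),
    List.foldl pvBStep (s ++ [cur]) rest = s ++ pvProc cur rest := by
  intro rest
  induction rest with
  | nil => intro s cur; simp only [List.foldl_nil, pvProc]
  | cons t rest ih =>
    intro s cur
    simp only [List.foldl_cons, pvBStep, List.getLast?_concat, List.dropLast_concat]
    cases h : pvRuleGet cur t with
    | some r => simp only [pvProc, h, ih]
    | none =>
      simp only [pvProc, h]
      rw [show (s ++ [cur]) ++ [t] = (s ++ [cur]) ++ [t] from rfl, ih (s ++ [cur]) t]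
      simp

-- the two literal rule tables agree, and list-vs-pair equality match
lemma pvPairBeq (cur t a b : String) :
    (([cur, t] : List String) == [a, b]) = (((a, b) : String × String) == (cur, t)) := by
  have h : (((a, b) : String × String) == (cur, t)) = (a == cur && b == t) := rfl
  have hL : (([cur, t] : List String) == [a, b]) = (cur == a && (t == b && true)) := rfl
  rw [h, hL, Bool.and_true, Bool.beq_comm, show (t == b) = (b == t) from Bool.beq_comm]

-- A's rule search at position s.length is B's dict lookup on the pair (cur, t)
lemma pvTryRules_eq (s : List String) (cur t : String) (rest : List String) :
    pvTryRules (s ++ cur :: t :: rest) (s.length : Int) =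
      pvRules.find? (fun r => r.1 == (cur, t)) := by
  unfold pvTryRules
  have hsl : PySem.List.slice (s ++ cur :: t :: rest) (some (s.length : Int))
      (some ((s.length : Int) + 2)) = [cur, t] := by
    have h2 : ((s.length : Int) + 2) = ((s.length + 2 : Nat) : Int) := by push_cast; ring
    rw [h2, PySem.List.slice_natCast, List.drop_left]
    simp [List.take_succ_cons]
  have hp : (fun (r : (String × String) × String) =>
      PySem.List.slice (s ++ cur :: t :: rest) (some (s.length : Int))
        (some ((s.length : Int) + 2)) == [r.1.1, r.1.2]) =
      (fun r => r.1 == (cur, t)) := by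
    funext r
    rw [hsl, pvPairBeq]
  rw [hp, show pvDupDict = pvRules from rfl]

-- at the last position the 2-slice is one element long: no rule matches
lemma pvTryRules_last (s : List String) (cur : String) :
    pvTryRules (s ++ [cur]) (s.length : Int) = none := by
  unfold pvTryRules
  apply List.find?_eq_none.mpr
  intro r _
  have h2 : ((s.length : Int) + 2) = ((s.length + 2 : Nat) : Int) := by push_cast; ring
  rw [h2, PySem.List.slice_natCast, List.drop_left]
  simp

-- the inner pass, started anywhere, computes pvProc on the suffix and a change count = length drop
lemma pvInner_eq : ∀ (rest : List String) (cur : String) (s : List String) (c : Int) (cm : Bool)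
    (fuel : Nat), 2 * rest.length + 2 ≤ fuel →
    pvInner fuel (s ++ cur :: rest) (s.length : Int) c cm =
      (s ++ pvProc cur rest, c + ((rest.length : Int) + 1 - ((pvProc cur rest).length : Int)), false) := by
  intro rest
  induction rest with
  | nil =>
    intro cur s c cm fuel hf
    match fuel, hf with
    | f + 1, hf' =>
      rw [pvInner]
      have hlt : (s.length : Int) < (((s ++ [cur]).length : Nat) : Int) := by
        simp
      rw [if_pos hlt, pvTryRules_last]
      match f, (by omega : 1 ≤ f) with
      | f' + 1, _ =>
        show pvInner (f' + 1) (s ++ [cur]) ((s.length : Int) + 1) c false = _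
        rw [pvInner]
        have hge : ¬ ((s.length : Int) + 1 < (((s ++ [cur]).length : Nat) : Int)) := by
          simp
        rw [if_neg hge]
        simp [pvProc]
  | cons t rest ih =>
    intro cur s c cm fuel hf
    match fuel, hf with
    | f + 1, hf' =>
      have hfle : 2 * rest.length + 2 ≤ f := by simp only [List.length_cons] at hf'; omega
      rw [pvInner]
      have hlt : (s.length : Int) < (((s ++ cur :: t :: rest).length : Nat) : Int) := by
        simp; omega
      rw [if_pos hlt, pvTryRules_eq]
      cases hfind : pvRules.find? (fun r => r.1 == (cur, t)) with
      | some rr =>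
        have hr : pvRuleGet cur t = some rr.2 := by simp [pvRuleGet, hfind]
        show pvInner f (PySem.List.slice (s ++ cur :: t :: rest) none (some (s.length : Int)) ++ [rr.2]
            ++ PySem.List.slice (s ++ cur :: t :: rest) (some ((s.length : Int) + 2)) none)
            (s.length : Int) (c + 1) true = _
        have hsl1 : PySem.List.slice (s ++ cur :: t :: rest) none (some (s.length : Int)) = s := by
          rw [PySem.List.slice_to_natCast, List.take_left]
        have hsl2 : PySem.List.slice (s ++ cur :: t :: rest) (some ((s.length : Int) + 2)) none = rest := by
          have h2 : ((s.length : Int) + 2) = ((s.length + 2 : Nat) : Int) := by push_cast; ring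
          rw [h2, PySem.List.slice_from_natCast]
          rw [show s.length + 2 = (s ++ [cur, t]).length by simp,
              show s ++ cur :: t :: rest = (s ++ [cur, t]) ++ rest by simp, List.drop_left]
        rw [hsl1, hsl2, show s ++ [rr.2] ++ rest = s ++ rr.2 :: rest by simp,
            ih rr.2 s (c + 1) true f hfle]
        have hp : pvProc cur (t :: rest) = pvProc rr.2 rest := by simp [pvProc, hr]
        rw [hp]
        refine Prod.ext rfl (Prod.ext ?_ rfl)
        show c + 1 + ((rest.length : Int) + 1 - ((pvProc rr.2 rest).length : Int)) =
          c + (((t :: rest).length : Int) + 1 - ((pvProc rr.2 rest).length : Int))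
        simp only [List.length_cons]
        push_cast
        ring
      | none =>
        have hr : pvRuleGet cur t = none := by simp [pvRuleGet, hfind]
        show pvInner f (s ++ cur :: t :: rest) ((s.length : Int) + 1) c false = _
        rw [show s ++ cur :: t :: rest = (s ++ [cur]) ++ t :: rest by simp,
            show (s.length : Int) + 1 = (((s ++ [cur]).length : Nat) : Int) by simp,
            ih t (s ++ [cur]) c false f hfle]
        have hp : pvProc cur (t :: rest) = cur :: pvProc t rest := by simp [pvProc, hr]
        rw [hp]
        refine Prod.ext ?_ (Prod.ext ?_ rfl)
        · simp
        · show c + ((rest.length : Int) + 1 - ((pvProc t rest).length : Int)) =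
            c + (((t :: rest).length : Int) + 1 - ((cur :: pvProc t rest).length : Int))
          simp only [List.length_cons]
          push_cast
          ring

-- ===== VERDICT (by name: the statement is the Claim_ definition above) =====
theorem change_duplicates_spec : Claim_equal_change_duplicates := by
  intro molecule _ hpre
  unfold Spec_change_duplicates
  match molecule, hpre with
  | cur :: rest, _ =>
    unfold change_duplicates
    rw [show (cur :: rest).length + 2 = ((cur :: rest).length + 1) + 1 by ring, pvOuter, if_pos rfl]
    have h := pvInner_eq rest cur [] 0 true (2 * (cur :: rest).length + 1)
      (by simp only [List.length_cons]; omega)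
    simp only [List.nil_append, List.length_nil, Int.natCast_zero] at h
    rw [h, pvOuter, if_neg (by simp)]
    have hfold : List.foldl pvBStep [] (cur :: rest) = pvProc cur rest := by
      have hstep : pvBStep [] cur = [cur] := rfl
      have := pvFold_eq rest [] cur
      simp only [List.nil_append] at this
      rw [List.foldl_cons, hstep, this]
    have halt : change_duplicates_alt (cur :: rest) =
        ((((cur :: rest).length : Nat) : Int) - ((pvProc cur rest).length : Int), pvProc cur rest) := by
      simp only [change_duplicates_alt, hfold]
    rw [halt]
    refine Prod.ext ?_ rfl
    show 0 + ((rest.length : Int) + 1 - ((pvProc cur rest).length : Int)) =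
      (((cur :: rest).length : Nat) : Int) - ((pvProc cur rest).length : Int)
    simp only [List.length_cons]
    push_cast
    ring
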